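-- pv_equiv track=rewrite | github.com/mmetterle/fogbugz-jira | fogbugz_export.py | split_comma_separated_list
-- ===== SOURCE A (Python) =====
-- def split_comma_separated_list(x):
--     subcase_str = ""
--     if x:
--         subcases = x.split(',')
--         for subcase in subcases:
--             subcase_str += subcase + ','
--         return subcase_str
--     else:
--         return x
-- ===== SOURCE B (Python) =====
-- def split_comma_separated_list(x):
--     if x:
--         return x + ','
--     else:
--         return x
-- ===== Notes on version B (the rewrite author's own statement) =====
-- stated objective: simpler
-- what changed: The split-on-comma-and-rejoin loop is replaced by a closed form: for a truthy string the loop reconstructs the input with one trailing comma appended, so B just concatenates a trailing comma; falsy inputs are returned unchanged.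
import Mathlib
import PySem

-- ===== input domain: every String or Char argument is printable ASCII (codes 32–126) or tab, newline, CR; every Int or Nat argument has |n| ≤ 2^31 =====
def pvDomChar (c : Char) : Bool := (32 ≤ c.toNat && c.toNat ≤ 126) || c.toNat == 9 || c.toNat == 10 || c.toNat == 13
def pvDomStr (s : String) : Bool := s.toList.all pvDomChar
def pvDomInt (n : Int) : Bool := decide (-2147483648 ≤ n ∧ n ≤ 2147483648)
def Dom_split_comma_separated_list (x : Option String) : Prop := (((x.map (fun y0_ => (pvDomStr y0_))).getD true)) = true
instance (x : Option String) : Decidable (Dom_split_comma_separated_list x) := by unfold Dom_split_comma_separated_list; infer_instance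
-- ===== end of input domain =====

-- B replaces A's split-on-comma and rejoin-with-trailing-comma loop by the closed form x + ',' (simpler; return values proved equal, no speed claim).

-- ===== PORT A =====
def split_comma_separated_list (x : Option String) : Option String :=
  match x with
  | none => none                       -- 'if x' false for None: return x
  | some s =>
    let subcase_str : String := ""
    if s ≠ "" then                     -- 'if x' for a string: nonempty
      match PySem.Str.split? s "," with
      | some subcases =>
          some (subcases.foldl (fun acc subcase => acc ++ subcase ++ ",") subcase_str)
      | none => none                   -- unreachable: the separator "," is nonempty
    else some s

-- ===== PORT B =====
def split_comma_separated_list_alt (x : Option String) : Option String :=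
  match x with
  | none => none
  | some s => if s ≠ "" then some (s ++ ",") else some s

-- ===== PRECONDITION & SPEC =====
def Spec_split_comma_separated_list (x : Option String) (out : Option String) : Prop := out = split_comma_separated_list_alt x
instance (x : Option String) (out : Option String) : Decidable (Spec_split_comma_separated_list x out) := by unfold Spec_split_comma_separated_list; infer_instance

-- ===== CLAIM (what is proved, stated in full; the proofs are below) =====
def Claim_equal_split_comma_separated_list : Prop := ∀ (x : Option String), Dom_split_comma_separated_list x → Spec_split_comma_separated_list x (split_comma_separated_list x)

-- ===== LEMMAS AND PROOFS =====

-- reference single-char split on ',' (proof helper)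
def spC : List Char → List (List Char)
  | [] => [[]]
  | a :: rest =>
    if a = ',' then [] :: spC rest
    else
      match spC rest with
      | h :: t => (a :: h) :: t
      | [] => [[a]]

theorem spC_ne_nil : ∀ l, spC l ≠ [] := by
  intro l
  cases l with
  | nil => simp [spC]
  | cons a rest =>
    simp only [spC]
    split
    · simp
    · split
      · simp
      · simp

theorem go_spec : ∀ (fuel : Nat) (l cur : List Char) (acc : List (List Char)), l.length ≤ fuel →
    PySem.Chars.splitOn.go [','] fuel l cur acc =
      acc.reverse ++ (match spC l with
                      | h :: t => (cur.reverse ++ h) :: t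
                      | [] => []) := by
  intro fuel
  induction fuel with
  | zero =>
    intro l cur acc h
    have hl : l = [] := List.length_eq_zero_iff.mp (Nat.le_zero.mp h)
    subst hl
    simp [PySem.Chars.splitOn.go, spC]
  | succ n ih =>
    intro l cur acc h
    cases l with
    | nil => simp [PySem.Chars.splitOn.go, spC]
    | cons c rest =>
      by_cases hc : c = ','
      · subst hc
        have hpre : List.isPrefixOf [','] (',' :: rest) = true := by
          simp [List.isPrefixOf]
        rw [show PySem.Chars.splitOn.go [','] (n+1) (',' :: rest) cur acc =
              PySem.Chars.splitOn.go [','] n (List.drop 1 (',' :: rest)) [] (cur.reverse :: acc) by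
            simp [PySem.Chars.splitOn.go, hpre]]
        rw [ih (List.drop 1 (',' :: rest)) [] (cur.reverse :: acc)
            (by simpa using Nat.le_of_succ_le_succ h)]
        simp only [List.drop_one, List.tail_cons, spC, if_pos]
        cases hs : spC rest with
        | nil => exact absurd hs (spC_ne_nil rest)
        | cons h2 t2 => simp
      · have hpre : List.isPrefixOf [','] (c :: rest) = false := by
          simp [List.isPrefixOf]
          exact fun hh => absurd hh.symm hc
        rw [show PySem.Chars.splitOn.go [','] (n+1) (c :: rest) cur acc =
              PySem.Chars.splitOn.go [','] n rest (c :: cur) acc by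
            simp [PySem.Chars.splitOn.go, hpre]]
        rw [ih rest (c :: cur) acc (Nat.le_of_succ_le_succ h)]
        simp only [spC, if_neg hc]
        cases hs : spC rest with
        | nil => exact absurd hs (spC_ne_nil rest)
        | cons h2 t2 => simp

theorem splitOn_eq_spC (cs : List Char) : PySem.Chars.splitOn cs [','] = spC cs := by
  unfold PySem.Chars.splitOn
  rw [go_spec (cs.length + 1) cs [] [] (Nat.le_succ _)]
  cases hs : spC cs with
  | nil => exact absurd hs (spC_ne_nil cs)
  | cons h t => simp

theorem foldl_spC : ∀ (l : List Char) (d : List Char),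
    (spC l).foldl (fun a p => a ++ p ++ [',']) d = d ++ l ++ [','] := by
  intro l
  induction l with
  | nil => intro d; simp [spC]
  | cons a rest ih =>
    intro d
    by_cases ha : a = ','
    · subst ha
      rw [show spC (',' :: rest) = [] :: spC rest from by simp [spC]]
      simp only [List.foldl_cons]
      rw [ih]
      simp
    · simp only [spC, if_neg ha]
      cases hs : spC rest with
      | nil => exact absurd hs (spC_ne_nil rest)
      | cons h t =>
        have := ih (d ++ [a])
        rw [hs] at this
        simp only [List.foldl_cons] at this ⊢
        rw [show d ++ (a :: h) ++ [','] = d ++ [a] ++ h ++ [','] by simp, this]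
        simp

theorem foldl_str : ∀ (parts : List (List Char)) (a : String),
    ((parts.map String.ofList).foldl (fun acc p => acc ++ p ++ ",") a).toList
      = parts.foldl (fun acc p => acc ++ p ++ [',']) a.toList := by
  intro parts
  induction parts with
  | nil => intro a; simp
  | cons h t ih =>
    intro a
    simp only [List.map_cons, List.foldl_cons]
    rw [ih]
    congr 1
    simp [String.toList_append]

-- ===== VERDICT (by name: the statement is the Claim_ definition above) =====
theorem split_comma_separated_list_spec : Claim_equal_split_comma_separated_list := by
  intro x _
  unfold Spec_split_comma_separated_list
  cases x with
  | none => rfl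
  | some s =>
    unfold split_comma_separated_list split_comma_separated_list_alt
    by_cases hs : s = ""
    · simp [hs]
    · simp only [ne_eq, hs, not_false_eq_true, if_pos]
      have hsplit : PySem.Str.split? s "," =
          some ((PySem.Chars.splitOn s.toList [',']).map String.ofList) := by
        unfold PySem.Str.split? PySem.Chars.split?
        rfl
      rw [hsplit]
      simp only []
      congr 1
      apply String.toList_inj.mp
      rw [foldl_str, splitOn_eq_spC, foldl_spC]
      simp [String.toList_append]
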